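-- pv_equiv track=rewrite | github.com/DeniseMDB/Programacion1 | Clase 6/Ejercicio 08.py | extraer_nombre
-- ===== SOURCE A (Python) =====
-- def extraer_nombre (heroe:dict)-> str:
--     nombre_heroe = heroe["nombre"].upper()
--     if(len(nombre_heroe) > 0):
--         if (nombre_heroe.count("THE") > 0):
--             nombre_heroe = nombre_heroe.replace("THE", "")
--         if (nombre_heroe.count("-") > 0):
--             nombre_heroe = nombre_heroe.replace("-", " ")
--         iniciales = ""
--         lista_nombres = nombre_heroe.split()
--         for nombre in range(len(lista_nombres)):
--             iniciales += "{0}.".format(lista_nombres[nombre][0])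
--         return iniciales
--     else:
--         return "N/A"
-- ===== SOURCE B (Python) =====
-- def extraer_nombre(heroe: dict) -> str:
--     nombre = heroe["nombre"].upper()
--     if not nombre:
--         return "N/A"
--     limpio = nombre.replace("THE", "").replace("-", " ")
--     iniciales = ""
--     at_word_start = True
--     for ch in limpio:
--         if ch.isspace():
--             at_word_start = True
--         else:
--             if at_word_start:
--                 iniciales += ch + "."
--             at_word_start = False
--     return iniciales
-- ===== Notes on version B (the rewrite author's own statement) =====
-- stated objective: simpler
-- what changed: Instead of building a token list with split() and looping over its indices, B does one character scan of the cleaned string with an at-word-start boolean, emitting 'c.' at each word boundary; the count() guards before replace() are dropped since replace is a no-op when the substring is absent.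
import Mathlib
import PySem

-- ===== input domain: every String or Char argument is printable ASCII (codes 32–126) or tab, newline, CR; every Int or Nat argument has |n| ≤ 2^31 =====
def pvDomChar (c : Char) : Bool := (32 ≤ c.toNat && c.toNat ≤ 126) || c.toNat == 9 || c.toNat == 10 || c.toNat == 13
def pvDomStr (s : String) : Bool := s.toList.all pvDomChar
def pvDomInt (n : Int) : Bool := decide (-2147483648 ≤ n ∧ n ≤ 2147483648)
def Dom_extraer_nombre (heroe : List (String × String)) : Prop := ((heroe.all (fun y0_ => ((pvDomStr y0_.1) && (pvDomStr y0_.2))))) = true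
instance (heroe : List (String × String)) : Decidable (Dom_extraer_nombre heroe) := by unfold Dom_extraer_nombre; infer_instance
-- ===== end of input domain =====

-- B replaces A's split()-plus-index-loop by a single character scan with an at-word-start flag
-- (the return value is the same; objective: simpler).

-- ===== PORT A =====
def extraer_nombre (heroe : List (String × String)) : String :=
  match PySem.Dict.get? ⟨heroe⟩ "nombre" with
  | none => ""   -- KeyError: excluded by Pre_
  | some nom =>
    let nombre_heroe := PySem.Str.upper nom
    if PySem.Str.len nombre_heroe > 0 then
      let nh1 := if PySem.Str.count nombre_heroe "THE" > 0
                 then PySem.Str.replace nombre_heroe "THE" "" else nombre_heroe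
      let nh2 := if PySem.Str.count nh1 "-" > 0
                 then PySem.Str.replace nh1 "-" " " else nh1
      let lista_nombres := PySem.Str.split₀ nh2
      (PySem.List.pyRange 0 (PySem.List.len lista_nombres)).foldl
        (fun iniciales i =>
          match PySem.List.pyGet? lista_nombres i with
          | some w =>
            match PySem.Str.pyGet? w 0 with
            | some c => iniciales ++ String.ofList [c] ++ "."
            | none => iniciales    -- IndexError: unreachable (split() pieces are nonempty)
          | none => iniciales)     -- IndexError: unreachable (i ranges over the valid indices)
        ""
    else "N/A"

-- ===== PORT B =====
def extraer_nombre_alt (heroe : List (String × String)) : String :=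
  match PySem.Dict.get? ⟨heroe⟩ "nombre" with
  | none => ""   -- KeyError: excluded by Pre_
  | some nom =>
    let nombre := PySem.Str.upper nom
    if PySem.Str.len nombre = 0 then "N/A"
    else
      let limpio := PySem.Str.replace (PySem.Str.replace nombre "THE" "") "-" " "
      let r := limpio.toList.foldl
        (fun (st : String × Bool) ch =>
          if PySem.Chars.isspace ch then (st.1, true)
          else ((if st.2 then st.1 ++ String.ofList [ch] ++ "." else st.1), false))
        ("", true)
      r.1

-- ===== PRECONDITION & SPEC =====
-- Pre_ excludes exactly the dicts without a "nombre" key, on which A raises KeyError.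
def Pre_extraer_nombre (heroe : List (String × String)) : Prop :=
  (PySem.Dict.get? ⟨heroe⟩ "nombre").isSome = true
instance (heroe : List (String × String)) : Decidable (Pre_extraer_nombre heroe) := by
  unfold Pre_extraer_nombre; infer_instance
def pvWitness_extraer_nombre : (List (String × String)) := [("nombre", "the-Flash man")]

def Spec_extraer_nombre (heroe : List (String × String)) (out : String) : Prop := out = extraer_nombre_alt heroe
instance (heroe : List (String × String)) (out : String) : Decidable (Spec_extraer_nombre heroe out) := by unfold Spec_extraer_nombre; infer_instance

-- ===== CLAIM (what is proved, stated in full; the proofs are below) =====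
def Claim_equal_extraer_nombre : Prop := ∀ (heroe : List (String × String)), Dom_extraer_nombre heroe → Pre_extraer_nombre heroe → Spec_extraer_nombre heroe (extraer_nombre heroe)

-- ===== LEMMAS AND PROOFS =====
def pvScan : List Char → Bool → List Char
  | [], _ => []
  | c :: cs, b =>
    if PySem.Chars.isspace c then pvScan cs true
    else (if b then [c, '.'] else []) ++ pvScan cs false

theorem pvScan_fold (cs : List Char) : ∀ (acc : String) (b : Bool),
    (cs.foldl
      (fun (st : String × Bool) ch =>
        if PySem.Chars.isspace ch then (st.1, true)
        else ((if st.2 then st.1 ++ String.ofList [ch] ++ "." else st.1), false))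
      (acc, b)).1.toList = acc.toList ++ pvScan cs b := by
  induction cs with
  | nil => intro acc b; simp [pvScan]
  | cons c cs ih =>
    intro acc b
    by_cases h : PySem.Chars.isspace c
    · simp [pvScan, h, List.foldl_cons, ih]
    · by_cases hb : b <;> simp [pvScan, h, hb, List.foldl_cons, ih]

theorem pvGo_acc (cs : List Char) : ∀ (cur : List Char) (acc : List (List Char)),
    PySem.Chars.split₀.go cs cur acc = acc.reverse ++ PySem.Chars.split₀.go cs cur [] := by
  induction cs with
  | nil =>
    intro cur acc
    by_cases h : cur.isEmpty <;> simp [PySem.Chars.split₀.go, h]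
  | cons c cs ih =>
    intro cur acc
    by_cases h : PySem.Chars.isspace c
    · by_cases hc : cur.isEmpty
      · simp only [PySem.Chars.split₀.go, h, hc, if_true]
        exact ih _ _
      · simp only [PySem.Chars.split₀.go, h, hc, if_true, if_false, Bool.false_eq_true]
        rw [ih [] (cur.reverse :: acc), ih [] [cur.reverse]]
        simp
    · simp only [PySem.Chars.split₀.go, h, Bool.false_eq_true, if_false]
      exact ih _ _

theorem pvGo_ne_nil (cs : List Char) : ∀ (cur : List Char) (acc : List (List Char)),
    (∀ a ∈ acc, a ≠ []) → ∀ w ∈ PySem.Chars.split₀.go cs cur acc, w ≠ [] := by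
  induction cs with
  | nil =>
    intro cur acc hacc w hw
    by_cases h : cur.isEmpty
    · simp only [PySem.Chars.split₀.go, h, if_true, List.mem_reverse] at hw
      exact hacc w hw
    · simp only [PySem.Chars.split₀.go, h, Bool.false_eq_true, if_false, List.reverse_cons,
        List.mem_append, List.mem_reverse, List.mem_singleton] at hw
      rcases hw with hw | hw
      · exact hacc w hw
      · subst hw; simpa [List.isEmpty_iff] using h
  | cons c cs ih =>
    intro cur acc hacc w hw
    by_cases h : PySem.Chars.isspace c
    · by_cases hc : cur.isEmpty
      · simp only [PySem.Chars.split₀.go, h, hc, if_true] at hw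
        exact ih _ _ hacc w hw
      · simp only [PySem.Chars.split₀.go, h, hc, if_true, if_false, Bool.false_eq_true] at hw
        refine ih _ _ ?_ w hw
        intro a ha
        rcases List.mem_cons.mp ha with ha | ha
        · subst ha; simpa [List.isEmpty_iff] using hc
        · exact hacc a ha
    · simp only [PySem.Chars.split₀.go, h, Bool.false_eq_true, if_false] at hw
      exact ih _ _ hacc w hw

def pvInis (ws : List (List Char)) : List Char := ws.flatMap (fun w => [w.headD ' ', '.'])

theorem pvScan_split (cs : List Char) :
    (pvScan cs true = pvInis (PySem.Chars.split₀.go cs [] [])) ∧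
    (∀ cur, cur ≠ [] → ∃ t rest, PySem.Chars.split₀.go cs cur [] = (cur.reverse ++ t) :: rest ∧
        pvScan cs false = pvInis rest) := by
  induction cs with
  | nil =>
    constructor
    · simp [pvScan, pvInis, PySem.Chars.split₀.go]
    · intro cur hcur
      refine ⟨[], [], ?_, ?_⟩
      · simp [PySem.Chars.split₀.go, List.isEmpty_iff, hcur]
      · simp [pvScan, pvInis]
  | cons c cs ih =>
    by_cases h : PySem.Chars.isspace c
    · constructor
      · simp only [pvScan, h, if_true]
        have : PySem.Chars.split₀.go (c :: cs) [] [] = PySem.Chars.split₀.go cs [] [] := by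
          simp [PySem.Chars.split₀.go, h]
        rw [this]; exact ih.1
      · intro cur hcur
        refine ⟨[], PySem.Chars.split₀.go cs [] [], ?_, ?_⟩
        · have : PySem.Chars.split₀.go (c :: cs) cur [] =
              PySem.Chars.split₀.go cs [] [cur.reverse] := by
            simp [PySem.Chars.split₀.go, h, List.isEmpty_iff, hcur]
          rw [this, pvGo_acc]
          simp
        · simp only [pvScan, h, if_true]
          exact ih.1
    · constructor
      · simp only [pvScan, h, Bool.false_eq_true, if_false, if_true]
        have hgo : PySem.Chars.split₀.go (c :: cs) [] [] = PySem.Chars.split₀.go cs [c] [] := by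
          simp [PySem.Chars.split₀.go, h]
        rw [hgo]
        obtain ⟨t, rest, he, hs⟩ := ih.2 [c] (by simp)
        rw [he, hs]
        simp [pvInis]
      · intro cur hcur
        have hgo : PySem.Chars.split₀.go (c :: cs) cur [] =
            PySem.Chars.split₀.go cs (c :: cur) [] := by
          simp [PySem.Chars.split₀.go, h]
        obtain ⟨t, rest, he, hs⟩ := ih.2 (c :: cur) (by simp)
        refine ⟨[c] ++ t, rest, ?_, ?_⟩
        · rw [hgo, he]; simp
        · simp only [pvScan, h, Bool.false_eq_true, if_false]
          simpa using hs

theorem pvCount_go_le (sub : List Char) : ∀ (fuel : Nat) (l : List Char) (acc : Nat),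
    acc ≤ PySem.Chars.count.go sub fuel l acc := by
  intro fuel
  induction fuel with
  | zero => intro l acc; cases l <;> simp [PySem.Chars.count.go]
  | succ fuel ih =>
    intro l acc
    cases l with
    | nil => simp [PySem.Chars.count.go]
    | cons c t =>
      by_cases h : sub.isPrefixOf (c :: t)
      · simp only [PySem.Chars.count.go, h, if_true]
        exact le_trans (Nat.le_succ acc) (ih _ _)
      · simp only [PySem.Chars.count.go, h, Bool.false_eq_true, if_false]
        exact ih _ _

theorem pvCount_go_pos (sub : List Char) (hsub : sub ≠ []) :
    ∀ (fuel : Nat) (l : List Char) (acc : Nat), l.length ≤ fuel → sub <:+: l →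
    acc < PySem.Chars.count.go sub fuel l acc := by
  intro fuel
  induction fuel with
  | zero =>
    intro l acc hlen hinf
    interval_cases hl : l.length
    · rw [List.length_eq_zero_iff] at hl; subst hl
      exact absurd (List.eq_nil_of_infix_nil hinf) hsub
  | succ fuel ih =>
    intro l acc hlen hinf
    cases l with
    | nil => exact absurd (List.eq_nil_of_infix_nil hinf) hsub
    | cons c t =>
      by_cases h : sub.isPrefixOf (c :: t)
      · simp only [PySem.Chars.count.go, h, if_true]
        exact lt_of_lt_of_le (Nat.lt_succ_self acc) (pvCount_go_le sub _ _ _)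
      · simp only [PySem.Chars.count.go, h, Bool.false_eq_true, if_false]
        refine ih t acc (by simpa using hlen) ?_
        rcases hinf with ⟨s₁, s₂, he⟩
        cases s₁ with
        | nil =>
          exfalso
          apply h
          rw [List.isPrefixOf_iff_prefix]
          exact ⟨s₂, by simpa using he⟩
        | cons a s₁' =>
          refine ⟨s₁', s₂, ?_⟩
          have := congrArg List.tail he
          simpa using this

theorem pvReplace_go_id (old new : List Char) : ∀ (fuel : Nat) (l : List Char) (acc : List Char),
    ¬ old <:+: l → PySem.Chars.replace.go old new fuel l acc = acc.reverse ++ l := by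
  intro fuel
  induction fuel with
  | zero => intro l acc _; cases l <;> simp [PySem.Chars.replace.go]
  | succ fuel ih =>
    intro l acc hinf
    cases l with
    | nil => simp [PySem.Chars.replace.go]
    | cons c t =>
      by_cases h : old.isPrefixOf (c :: t)
      · exfalso
        exact hinf ((List.isPrefixOf_iff_prefix.mp h).isInfix)
      · simp only [PySem.Chars.replace.go, h, Bool.false_eq_true, if_false]
        have ht : ¬ old <:+: t := by
          intro hi
          exact hinf (hi.trans (by exact ⟨[c], [], by simp⟩))
        rw [ih t (c :: acc) ht]
        simp

theorem pvReplace_count_zero (s old new : String) (hold : old.toList ≠ [])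
    (h : PySem.Str.count s old = 0) : PySem.Str.replace s old new = s := by
  have hinf : ¬ old.toList <:+: s.toList := by
    intro hi
    have hc : PySem.Str.count s old = PySem.Chars.count s.toList old.toList := by
      simp [PySem.Str.count_eq]
    rw [hc] at h
    unfold PySem.Chars.count at h
    rw [if_neg (by simpa [List.isEmpty_iff] using hold)] at h
    have := pvCount_go_pos old.toList hold s.toList.length s.toList 0 le_rfl hi
    omega
  apply String.toList_inj.mp
  rw [PySem.Str.toList_replace]
  unfold PySem.Chars.replace
  rw [if_neg (by simpa [List.isEmpty_iff] using hold)]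
  simpa using pvReplace_go_id old.toList new.toList s.toList.length s.toList [] hinf

theorem pvCond_replace (s old new : String) (hold : old.toList ≠ []) :
    (if PySem.Str.count s old > 0 then PySem.Str.replace s old new else s) =
      PySem.Str.replace s old new := by
  by_cases h : PySem.Str.count s old > 0
  · rw [if_pos h]
  · rw [if_neg h, pvReplace_count_zero s old new hold (by omega)]

theorem pvFold_inis (ws : List String) : ∀ (acc : String), (∀ w ∈ ws, w.toList ≠ []) →
    (ws.foldl
      (fun (acc : String) (w : String) =>
        match PySem.Str.pyGet? w 0 with
        | some c => acc ++ String.ofList [c] ++ "."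
        | none => acc) acc).toList = acc.toList ++ pvInis (ws.map String.toList) := by
  induction ws with
  | nil => intro acc _; simp [pvInis]
  | cons w ws ih =>
    intro acc hne
    obtain ⟨c, t, hw⟩ : ∃ c t, w.toList = c :: t := by
      rcases hx : w.toList with _ | ⟨c, t⟩
      · exact absurd hx (hne w (by simp))
      · exact ⟨c, t, rfl⟩
    have hg : PySem.Str.pyGet? w 0 = some c := by
      rw [PySem.Str.pyGet?_eq, PySem.Chars.pyGet?_eq_listPyGet?, hw, PySem.List.pyGet?_zero_cons]
    simp only [List.foldl_cons, hg]
    rw [ih _ (fun x hx => hne x (by simp [hx]))]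
    simp [pvInis, hw]

theorem pvA_loop (s : String) :
    ((PySem.List.pyRange 0 (PySem.List.len (PySem.Str.split₀ s))).foldl
      (fun iniciales i =>
        match PySem.List.pyGet? (PySem.Str.split₀ s) i with
        | some w =>
          match PySem.Str.pyGet? w 0 with
          | some c => iniciales ++ String.ofList [c] ++ "."
          | none => iniciales
        | none => iniciales)
      "").toList = pvInis (PySem.Chars.split₀ s.toList) := by
  set lista := PySem.Str.split₀ s with hl
  have hlenr : PySem.List.len lista = (lista.length : Int) := rfl
  have h1 : ∀ (acc : String), ∀ i ∈ PySem.List.pyRange 0 (PySem.List.len lista),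
      (match PySem.List.pyGet? lista i with
        | some w =>
          match PySem.Str.pyGet? w 0 with
          | some c => acc ++ String.ofList [c] ++ "."
          | none => acc
        | none => acc) =
      (fun (acc : String) (w : String) =>
        match PySem.Str.pyGet? w 0 with
        | some c => acc ++ String.ofList [c] ++ "."
        | none => acc) acc (PySem.List.pyGetD lista i "") := by
    intro acc i hi
    rw [PySem.List.mem_pyRange_one] at hi
    have h0 : 0 ≤ i := hi.1
    have hlen : i < (lista.length : Int) := by omega
    rw [PySem.List.pyGet?_of_nonneg_of_lt lista h0 hlen,
        PySem.List.pyGetD_eq_getElem lista "" h0 hlen,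
        List.getElem?_eq_getElem (by omega)]
  rw [PySem.List.foldl_congr_mem _ _ _ _ h1,
      PySem.List.foldl_pyRange_zero_pyGetD lista ""
        (fun (acc : String) (w : String) =>
          match PySem.Str.pyGet? w 0 with
          | some c => acc ++ String.ofList [c] ++ "."
          | none => acc) ""]
  have hne : ∀ w ∈ lista, w.toList ≠ [] := by
    intro w hw
    have hmem : w.toList ∈ PySem.Chars.split₀ s.toList := by
      rw [← PySem.Str.split₀_map_toList s]
      exact List.mem_map_of_mem hw
    unfold PySem.Chars.split₀ at hmem
    exact pvGo_ne_nil s.toList [] [] (by simp) w.toList hmem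
  rw [pvFold_inis lista "" hne]
  rw [PySem.Str.split₀_map_toList s]
  simp

theorem pvMain : ∀ (heroe : List (String × String)),
    (PySem.Dict.get? ⟨heroe⟩ "nombre").isSome = true →
    (match PySem.Dict.get? (⟨heroe⟩ : PySem.Dict String String) "nombre" with
     | none => ""
     | some nom =>
       let nombre_heroe := PySem.Str.upper nom
       if PySem.Str.len nombre_heroe > 0 then
         let nh1 := if PySem.Str.count nombre_heroe "THE" > 0
                    then PySem.Str.replace nombre_heroe "THE" "" else nombre_heroe
         let nh2 := if PySem.Str.count nh1 "-" > 0
                    then PySem.Str.replace nh1 "-" " " else nh1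
         let lista_nombres := PySem.Str.split₀ nh2
         (PySem.List.pyRange 0 (PySem.List.len lista_nombres)).foldl
           (fun iniciales i =>
             match PySem.List.pyGet? lista_nombres i with
             | some w =>
               match PySem.Str.pyGet? w 0 with
               | some c => iniciales ++ String.ofList [c] ++ "."
               | none => iniciales
             | none => iniciales)
           ""
       else "N/A") =
    (match PySem.Dict.get? (⟨heroe⟩ : PySem.Dict String String) "nombre" with
     | none => ""
     | some nom =>
       let nombre := PySem.Str.upper nom
       if PySem.Str.len nombre = 0 then "N/A"
       else
         let limpio := PySem.Str.replace (PySem.Str.replace nombre "THE" "") "-" " "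
         let r := limpio.toList.foldl
           (fun (st : String × Bool) ch =>
             if PySem.Chars.isspace ch then (st.1, true)
             else ((if st.2 then st.1 ++ String.ofList [ch] ++ "." else st.1), false))
           ("", true)
         r.1) := by
  intro heroe hpre
  rcases hget : PySem.Dict.get? (⟨heroe⟩ : PySem.Dict String String) "nombre" with _ | nom
  · rw [hget] at hpre
  · dsimp only
    set nombre := PySem.Str.upper nom with hn
    have hlen : PySem.Str.len nombre = (nombre.toList.length : Int) := PySem.Str.len_eq nombre
    by_cases hz : PySem.Str.len nombre > 0
    · have hz' : ¬ (PySem.Str.len nombre = 0) := by omega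
      rw [if_pos hz, if_neg hz']
      rw [pvCond_replace nombre "THE" "" (by decide)]
      rw [pvCond_replace _ "-" " " (by decide)]
      set limpio := PySem.Str.replace (PySem.Str.replace nombre "THE" "") "-" " " with hlimp
      apply String.toList_inj.mp
      rw [pvA_loop limpio]
      rw [pvScan_fold limpio.toList "" true]
      have := (pvScan_split limpio.toList).1
      unfold PySem.Chars.split₀
      rw [this]
      simp
    · have hz0 : PySem.Str.len nombre = 0 := by omega
      rw [if_neg hz, if_pos hz0]

-- ===== VERDICT (by name: the statement is the Claim_ definition above) =====
theorem extraer_nombre_spec : Claim_equal_extraer_nombre := by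
  intro heroe _ hpre
  exact pvMain heroe hpre
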